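-- pv_equiv track=rewrite | github.com/ElliottSax/engineer | training_iterations/training_iteration60.py | second_shortest_path
-- ===== SOURCE A (Python) =====
-- import heapq
-- from collections import defaultdict, deque
--
-- def second_shortest_path(n, edges, src, dst):
--     """Second shortest path (not strictly shortest)."""
--     graph = defaultdict(list)
--     for u, v, w in edges:
--         graph[u].append((v, w))
--         graph[v].append((u, w))
--
--     dist = [[float('inf'), float('inf')] for _ in range(n)]
--     dist[src][0] = 0
--     heap = [(0, src, 0)]  # dist, node, which_shortest
--
--     while heap:
--         d, u, idx = heapq.heappop(heap)
--         if d > dist[u][idx]: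
--             continue
--         for v, w in graph[u]:
--             new_dist = d + w
--             if new_dist < dist[v][0]:
--                 dist[v][1] = dist[v][0]
--                 dist[v][0] = new_dist
--                 heapq.heappush(heap, (new_dist, v, 0))
--             elif dist[v][0] < new_dist < dist[v][1]:
--                 dist[v][1] = new_dist
--                 heapq.heappush(heap, (new_dist, v, 1))
--
--     return dist[dst][1] if dist[dst][1] != float('inf') else -1
-- ===== SOURCE B (Python) =====
-- def second_shortest_path(n, edges, src, dst):
--     """Second shortest path (not strictly shortest)."""
--     INF = float('inf')
--     d0 = [INF] * n
--     d1 = [INF] * n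
--     d0[src] = 0
--     pending = [(0, src, 0)]
--
--     def relax(d, v, w):
--         nd = d + w
--         if nd < d0[v]:
--             d1[v] = d0[v]
--             d0[v] = nd
--             pending.append((nd, v, 0))
--         elif d0[v] < nd < d1[v]:
--             d1[v] = nd
--             pending.append((nd, v, 1))
--
--     while pending:
--         best = min(pending)
--         pending.remove(best)
--         d, u, idx = best
--         if d > (d0[u] if idx == 0 else d1[u]):
--             continue
--         for a, b, w in edges:
--             if a == u:
--                 relax(d, b, w)
--             if b == u:
--                 relax(d, a, w)
--
--     return d1[dst] if d1[dst] != INF else -1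
-- ===== Notes on version B (the rewrite author's own statement) =====
-- stated objective: alternative
-- what changed: B drops A's binary heap and prebuilt adjacency dict: it keeps an unsorted pending list from which it scans out the minimum (d,node,idx) tuple each round, stores the two tentative distances in two separate arrays instead of A's list of [d0,d1] pairs, and relaxes neighbours by scanning the edge list directly per popped node instead of looking up a defaultdict built beforehand.
import Mathlib
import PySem

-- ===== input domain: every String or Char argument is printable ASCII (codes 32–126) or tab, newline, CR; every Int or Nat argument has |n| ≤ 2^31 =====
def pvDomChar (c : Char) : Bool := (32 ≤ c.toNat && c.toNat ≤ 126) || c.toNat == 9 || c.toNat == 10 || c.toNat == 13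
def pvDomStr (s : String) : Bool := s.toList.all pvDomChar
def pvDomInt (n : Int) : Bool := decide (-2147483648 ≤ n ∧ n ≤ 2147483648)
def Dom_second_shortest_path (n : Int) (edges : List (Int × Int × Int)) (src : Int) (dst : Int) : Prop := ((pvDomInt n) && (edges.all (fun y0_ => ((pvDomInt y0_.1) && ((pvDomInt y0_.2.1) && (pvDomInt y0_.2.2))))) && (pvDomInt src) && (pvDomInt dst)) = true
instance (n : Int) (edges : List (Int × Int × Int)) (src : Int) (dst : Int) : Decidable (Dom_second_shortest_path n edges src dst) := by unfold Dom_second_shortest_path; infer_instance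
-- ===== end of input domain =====

-- B replaces A's heapq + paired-distance-list Dijkstra variant by a heap-free one: an unsorted
-- pending list scanned for its minimum, two separate distance arrays, and a direct scan of the
-- edge list in place of a prebuilt adjacency dict; same return values, no speed claim.

-- shared modelling helpers -------------------------------------------------
-- Python tuple comparison (d, node, idx) < (d', node', idx'): lexicographic on Int triples
def pvTlt (a b : Int × Int × Int) : Bool :=
  if a.1 < b.1 then true
  else if b.1 < a.1 then false
  else if a.2.1 < b.2.1 then true
  else if b.2.1 < a.2.1 then false
  else decide (a.2.2 < b.2.2)

-- Python min of two tuples (keeps the first argument on ties)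
def pvMin2 (a b : Int × Int × Int) : Int × Int × Int := if pvTlt b a then b else a

-- smallest element and the remaining multiset: models heapq.heappop (port A) and
-- min(pending) + pending.remove (port B); exact in values (equal tuples are identical)
def pvPopMin? (l : List (Int × Int × Int)) : Option ((Int × Int × Int) × List (Int × Int × Int)) :=
  match l with
  | [] => none
  | x :: xs => let m := xs.foldl pvMin2 x; some (m, (x :: xs).erase m)

-- comparisons against float('inf'), modelled as none
def pvLtInf (x : Int) (o : Option Int) : Bool := match o with | none => true | some k => decide (x < k)
def pvInfLt (o : Option Int) (x : Int) : Bool := match o with | none => false | some k => decide (k < x)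

-- fuel: an upper bound on the number of loop iterations under Pre_ (nonnegative weights);
-- both loops exit by themselves on an empty pending list, fuel is a port artefact only
def pvFuel (n : Int) (edges : List (Int × Int × Int)) : Nat :=
  let N := n.toNat
  let W := edges.foldl (fun s e => s + e.2.2.toNat) 0
  2 * N * (2 * N * W + 2) + 2

-- Python negative-index wraparound on a length-n list: dist[i] reads slot i+n for -n <= i < 0
def pvIdx (n : Int) (i : Int) : Nat := (if i < 0 then i + n else i).toNat

-- ===== PORT A =====
-- graph = defaultdict(list); for u,v,w in edges: graph[u].append((v,w)); graph[v].append((u,w))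
def sspAdj (edges : List (Int × Int × Int)) : PySem.Dict Int (List (Int × Int)) :=
  edges.foldl (fun g e =>
    let g1 := g.modify e.1 [] (fun l => l ++ [(e.2.1, e.2.2)])
    g1.modify e.2.1 [] (fun l => l ++ [(e.1, e.2.2)])) PySem.Dict.empty

-- the relaxation body of A's inner for-loop; state = (dist, heap)
def sspRelaxA (n d v w : Int) (st : List (Option Int × Option Int) × List (Int × Int × Int)) :
    List (Option Int × Option Int) × List (Int × Int × Int) :=
  let nd := d + w
  let ev := st.1.getD (pvIdx n v) (none, none)
  if pvLtInf nd ev.1 then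
    (st.1.set (pvIdx n v) (some nd, ev.1), (nd, v, 0) :: st.2)
  else if pvInfLt ev.1 nd && pvLtInf nd ev.2 then
    (st.1.set (pvIdx n v) (ev.1, some nd), (nd, v, 1) :: st.2)
  else st

def sspLoopA (n : Int) (g : PySem.Dict Int (List (Int × Int))) :
    Nat → List (Int × Int × Int) → List (Option Int × Option Int) → List (Option Int × Option Int)
  | 0, _, dist => dist
  | fuel + 1, hp, dist =>
    match pvPopMin? hp with
    | none => dist
    | some ((d, u, idx), hp') =>
      let e := dist.getD (pvIdx n u) (none, none)
      if pvInfLt (if idx == 0 then e.1 else e.2) d then sspLoopA n g fuel hp' dist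
      else
        let st := (g.getD u []).foldl (fun st vw => sspRelaxA n d vw.1 vw.2 st) (dist, hp')
        sspLoopA n g fuel st.2 st.1

def second_shortest_path (n : Int) (edges : List (Int × Int × Int)) (src : Int) (dst : Int) : Int :=
  let g := sspAdj edges
  let dist := (List.replicate n.toNat ((none : Option Int), (none : Option Int))).set (pvIdx n src) (some 0, none)
  let distF := sspLoopA n g (pvFuel n edges) [(0, src, 0)] dist
  match (distF.getD (pvIdx n dst) (none, none)).2 with
  | some k => k
  | none => -1

-- ===== PORT B =====
-- the relaxation closure of Source B; state = (d0, d1, pending), pushes append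
def sspRelaxB (n d v w : Int) (st : List (Option Int) × List (Option Int) × List (Int × Int × Int)) :
    List (Option Int) × List (Option Int) × List (Int × Int × Int) :=
  let nd := d + w
  if pvLtInf nd (st.1.getD (pvIdx n v) none) then
    (st.1.set (pvIdx n v) (some nd), st.2.1.set (pvIdx n v) (st.1.getD (pvIdx n v) none), st.2.2 ++ [(nd, v, 0)])
  else if pvInfLt (st.1.getD (pvIdx n v) none) nd && pvLtInf nd (st.2.1.getD (pvIdx n v) none) then
    (st.1, st.2.1.set (pvIdx n v) (some nd), st.2.2 ++ [(nd, v, 1)])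
  else st

def sspLoopB (n : Int) (edges : List (Int × Int × Int)) :
    Nat → List (Int × Int × Int) → List (Option Int) → List (Option Int) →
    List (Option Int) × List (Option Int)
  | 0, _, d0, d1 => (d0, d1)
  | fuel + 1, pend, d0, d1 =>
    match pvPopMin? pend with
    | none => (d0, d1)
    | some ((d, u, idx), pend') =>
      if pvInfLt (if idx == 0 then d0.getD (pvIdx n u) none else d1.getD (pvIdx n u) none) d then
        sspLoopB n edges fuel pend' d0 d1
      else
        let st := edges.foldl (fun st e =>
          let st1 := if e.1 == u then sspRelaxB n d e.2.1 e.2.2 st else st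
          if e.2.1 == u then sspRelaxB n d e.1 e.2.2 st1 else st1) (d0, d1, pend')
        sspLoopB n edges fuel st.2.2 st.1 st.2.1

def second_shortest_path_alt (n : Int) (edges : List (Int × Int × Int)) (src : Int) (dst : Int) : Int :=
  let d0 := (List.replicate n.toNat (none : Option Int)).set (pvIdx n src) (some 0)
  let d1 := List.replicate n.toNat (none : Option Int)
  let r := sspLoopB n edges (pvFuel n edges) [(0, src, 0)] d0 d1
  match r.2.getD (pvIdx n dst) none with
  | some k => k
  | none => -1

-- ===== PRECONDITION & SPEC =====
-- the labels connected to src in the undirected graph drawn by the edge list (labels taken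
-- literally): one closure pass adds both endpoints of any edge touching the set, and
-- edges.length passes reach the fixpoint
def pvStep (edges : List (Int × Int × Int)) (s : List Int) : List Int :=
  edges.foldl (fun s e => if e.1 ∈ s ∨ e.2.1 ∈ s then e.1 :: e.2.1 :: s else s) s

def pvReachAux : Nat → List (Int × Int × Int) → List Int → List Int
  | 0, _, s => s
  | k + 1, edges, s => pvReachAux k edges (pvStep edges s)

def pvReach (edges : List (Int × Int × Int)) (src : Int) : List Int :=
  pvReachAux edges.length edges [src]

-- Pre_: src and dst are valid Python indices of a length-n list (in [-n, n), negative ones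
-- wrap), and every edge touching src's connected component has valid labels and weight ≥ 0;
-- edges disconnected from src are unconstrained because A never touches them.  Outside Pre_
-- Python A raises IndexError when an out-of-range label is reached from src and loops forever
-- on a reachable negative edge, so exactly the connected part must be well-formed.
def Pre_second_shortest_path (n : Int) (edges : List (Int × Int × Int)) (src : Int) (dst : Int) : Prop :=
  -n ≤ src ∧ src < n ∧ -n ≤ dst ∧ dst < n ∧
  ∀ e ∈ edges, (e.1 ∈ pvReach edges src ∨ e.2.1 ∈ pvReach edges src) →
    (-n ≤ e.1 ∧ e.1 < n ∧ -n ≤ e.2.1 ∧ e.2.1 < n ∧ 0 ≤ e.2.2)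
instance (n : Int) (edges : List (Int × Int × Int)) (src : Int) (dst : Int) : Decidable (Pre_second_shortest_path n edges src dst) := by unfold Pre_second_shortest_path; infer_instance

def pvWitness_second_shortest_path : Int × (List (Int × Int × Int)) × Int × Int :=
  (3, [(0, 1, 2), (1, 2, 1), (0, 2, 5)], 0, 2)

def Spec_second_shortest_path (n : Int) (edges : List (Int × Int × Int)) (src : Int) (dst : Int) (out : Int) : Prop := out = second_shortest_path_alt n edges src dst
instance (n : Int) (edges : List (Int × Int × Int)) (src : Int) (dst : Int) (out : Int) : Decidable (Spec_second_shortest_path n edges src dst out) := by unfold Spec_second_shortest_path; infer_instance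

-- ===== CLAIM (what is proved, stated in full; the proofs are below) =====
def Claim_equal_second_shortest_path : Prop := ∀ (n : Int) (edges : List (Int × Int × Int)) (src : Int) (dst : Int), Dom_second_shortest_path n edges src dst → Pre_second_shortest_path n edges src dst → Spec_second_shortest_path n edges src dst (second_shortest_path n edges src dst)

-- ===== LEMMAS AND PROOFS =====

-- what A's adjacency build yields at a key: the neighbours of u in edge-scan order
def pvNeighbors (edges : List (Int × Int × Int)) (u : Int) : List (Int × Int) :=
  edges.flatMap (fun e =>
    (if e.1 == u then [(e.2.1, e.2.2)] else []) ++ (if e.2.1 == u then [(e.1, e.2.2)] else []))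

lemma pvTlt_iff (a b : Int × Int × Int) :
    pvTlt a b = true ↔ (a.1 < b.1 ∨ (a.1 = b.1 ∧ (a.2.1 < b.2.1 ∨ (a.2.1 = b.2.1 ∧ a.2.2 < b.2.2)))) := by
  unfold pvTlt; split_ifs <;> simp <;> omega

lemma pvTlt_antisymm {a b : Int × Int × Int}
    (h1 : pvTlt a b = false) (h2 : pvTlt b a = false) : a = b := by
  obtain ⟨a1, a2, a3⟩ := a; obtain ⟨b1, b2, b3⟩ := b
  rw [← Bool.not_eq_true, pvTlt_iff] at h1 h2
  simp only [Prod.mk.injEq]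
  simp at h1 h2
  refine ⟨by omega, by omega, by omega⟩

lemma foldl_pvMin2_spec (x : Int × Int × Int) (xs : List (Int × Int × Int)) :
    (xs.foldl pvMin2 x) ∈ x :: xs ∧ ∀ y ∈ x :: xs, pvTlt y (xs.foldl pvMin2 x) = false := by
  induction xs generalizing x with
  | nil =>
    simp only [List.foldl_nil]
    refine ⟨List.mem_cons_self, ?_⟩
    intro y hy; simp at hy; subst hy
    rw [← Bool.not_eq_true, pvTlt_iff]; omega
  | cons a xs ih =>
    obtain ⟨ihm, ihle⟩ := ih (pvMin2 x a)
    have hfold : (a :: xs).foldl pvMin2 x = xs.foldl pvMin2 (pvMin2 x a) := rfl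
    rw [hfold]
    constructor
    · by_cases hxa : pvTlt a x = true
      · have hch : pvMin2 x a = a := by unfold pvMin2; simp [hxa]
        rw [hch] at ihm ⊢
        rcases List.mem_cons.mp ihm with h | h
        · simp [h]
        · simp [h]
      · have hch : pvMin2 x a = x := by unfold pvMin2; simp [hxa]
        rw [hch] at ihm ⊢
        rcases List.mem_cons.mp ihm with h | h
        · simp [h]
        · simp [h]
    · intro y hy
      have hminle : pvTlt (pvMin2 x a) (xs.foldl pvMin2 (pvMin2 x a)) = false :=
        ihle _ List.mem_cons_self
      rcases List.mem_cons.mp hy with hyx | hy'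
      · -- y = x
        rw [hyx]
        by_cases hxa : pvTlt a x = true
        · have hch : pvMin2 x a = a := by unfold pvMin2; simp [hxa]
          rw [hch] at hminle ⊢
          rw [← Bool.not_eq_true, pvTlt_iff] at hminle ⊢
          rw [pvTlt_iff] at hxa
          omega
        · have hch : pvMin2 x a = x := by unfold pvMin2; simp [hxa]
          rw [hch] at hminle ⊢; exact hminle
      · rcases List.mem_cons.mp hy' with hya | hy''
        · -- y = a
          rw [hya]
          by_cases hxa : pvTlt a x = true
          · have hch : pvMin2 x a = a := by unfold pvMin2; simp [hxa]
            rw [hch] at hminle ⊢; exact hminle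
          · have hch : pvMin2 x a = x := by unfold pvMin2; simp [hxa]
            rw [hch] at hminle ⊢
            simp only [Bool.not_eq_true] at hxa
            rw [← Bool.not_eq_true, pvTlt_iff] at hminle hxa ⊢
            omega
        · exact ihle _ (List.mem_cons_of_mem _ hy'')

lemma pvPopMin?_perm {l l' : List (Int × Int × Int)} (h : l.Perm l') :
    (pvPopMin? l = none ∧ pvPopMin? l' = none) ∨
    ∃ m r r', pvPopMin? l = some (m, r) ∧ pvPopMin? l' = some (m, r') ∧ r.Perm r' := by
  cases l with
  | nil =>
    left; have : l' = [] := h.nil_eq.symm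
    subst this; exact ⟨rfl, rfl⟩
  | cons x xs =>
    cases l' with
    | nil => rw [List.perm_nil] at h; simp at h
    | cons y ys =>
      right
      obtain ⟨hmem, hle⟩ := foldl_pvMin2_spec x xs
      obtain ⟨hmem', hle'⟩ := foldl_pvMin2_spec y ys
      have hmm : xs.foldl pvMin2 x = ys.foldl pvMin2 y :=
        pvTlt_antisymm (hle' _ (h.mem_iff.mp hmem)) (hle _ (h.mem_iff.mpr hmem'))
      refine ⟨xs.foldl pvMin2 x, (x :: xs).erase (xs.foldl pvMin2 x),
        (y :: ys).erase (xs.foldl pvMin2 x), rfl, ?_, h.erase _⟩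
      simp only [pvPopMin?]
      rw [← hmm]

-- getD through map on the paired distance list
lemma getD_map_fst (l : List (Option Int × Option Int)) (i : Nat) :
    (l.map Prod.fst).getD i none = (l.getD i ((none : Option Int), (none : Option Int))).1 := by
  rw [List.getD_eq_getElem?_getD, List.getD_eq_getElem?_getD, List.getElem?_map]
  cases l[i]? <;> simp

lemma getD_map_snd (l : List (Option Int × Option Int)) (i : Nat) :
    (l.map Prod.snd).getD i none = (l.getD i ((none : Option Int), (none : Option Int))).2 := by
  rw [List.getD_eq_getElem?_getD, List.getD_eq_getElem?_getD, List.getElem?_map]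
  cases l[i]? <;> simp

lemma set_getD_self {α : Type} (l : List α) (i : Nat) (d : α) :
    l.set i (l.getD i d) = l := by
  by_cases h : i < l.length
  · rw [List.getD_eq_getElem?_getD, List.getElem?_eq_getElem h]
    simp
  · exact List.set_eq_of_length_le (by omega)

-- state relation between the two ports
def pvRel (dist : List (Option Int × Option Int)) (hp : List (Int × Int × Int))
    (st : List (Option Int) × List (Option Int) × List (Int × Int × Int)) : Prop :=
  dist.map Prod.fst = st.1 ∧ dist.map Prod.snd = st.2.1 ∧ hp.Perm st.2.2

lemma relax_rel (n d v w : Int) (dist : List (Option Int × Option Int))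
    (hp : List (Int × Int × Int)) (st : List (Option Int) × List (Option Int) × List (Int × Int × Int))
    (h : pvRel dist hp st) :
    pvRel (sspRelaxA n d v w (dist, hp)).1 (sspRelaxA n d v w (dist, hp)).2 (sspRelaxB n d v w st) := by
  obtain ⟨st0, st1, pend⟩ := st
  obtain ⟨h0, h1, hp2⟩ := h
  simp only at h0 h1
  subst h0 h1
  unfold sspRelaxA sspRelaxB pvRel
  simp only [getD_map_fst, getD_map_snd]
  split_ifs with c1 c2
  · refine ⟨?_, ?_, ?_⟩
    · simp [List.map_set]
    · simp [List.map_set]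
    · exact ((hp2.cons _).trans (List.perm_append_singleton _ _).symm)
  · refine ⟨?_, ?_, ?_⟩
    · simp only [List.map_set]
      rw [← getD_map_fst, set_getD_self]
    · simp [List.map_set]
    · exact ((hp2.cons _).trans (List.perm_append_singleton _ _).symm)
  · exact ⟨rfl, rfl, hp2⟩

lemma fold_rel (n u d : Int) (es : List (Int × Int × Int)) :
    ∀ (dist : List (Option Int × Option Int)) (hp : List (Int × Int × Int))
      (st : List (Option Int) × List (Option Int) × List (Int × Int × Int)),
      pvRel dist hp st →
      pvRel ((pvNeighbors es u).foldl (fun st vw => sspRelaxA n d vw.1 vw.2 st) (dist, hp)).1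
            ((pvNeighbors es u).foldl (fun st vw => sspRelaxA n d vw.1 vw.2 st) (dist, hp)).2
            (es.foldl (fun st e =>
              let st1 := if e.1 == u then sspRelaxB n d e.2.1 e.2.2 st else st
              if e.2.1 == u then sspRelaxB n d e.1 e.2.2 st1 else st1) st) := by
  induction es with
  | nil => intro dist hp st h; simpa [pvNeighbors] using h
  | cons e es ih =>
    intro dist hp st h
    have hsplit : pvNeighbors (e :: es) u =
        ((if e.1 == u then [(e.2.1, e.2.2)] else []) ++ (if e.2.1 == u then [(e.1, e.2.2)] else []))
          ++ pvNeighbors es u := by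
      simp [pvNeighbors]
    rw [hsplit, List.foldl_append, List.foldl_append, List.foldl_cons]
    by_cases c1 : e.1 == u <;> by_cases c2 : e.2.1 == u <;>
      simp only [c1, c2, if_true, List.foldl_cons, List.foldl_nil]
    · exact ih _ _ _ (relax_rel _ _ _ _ _ _ _ (relax_rel _ _ _ _ _ _ _ h))
    · exact ih _ _ _ (relax_rel _ _ _ _ _ _ _ h)
    · exact ih _ _ _ (relax_rel _ _ _ _ _ _ _ h)
    · exact ih _ _ _ h

lemma adj_getD (edges : List (Int × Int × Int)) (u : Int) :
    ∀ g : PySem.Dict Int (List (Int × Int)),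
      ((edges.foldl (fun g e =>
        let g1 := g.modify e.1 [] (fun l => l ++ [(e.2.1, e.2.2)])
        g1.modify e.2.1 [] (fun l => l ++ [(e.1, e.2.2)])) g).getD u []) =
      g.getD u [] ++ pvNeighbors edges u := by
  induction edges with
  | nil => intro g; simp [pvNeighbors]
  | cons e es ih =>
    intro g
    rw [List.foldl_cons, ih]
    have hstep : ((g.modify e.1 [] (fun l => l ++ [(e.2.1, e.2.2)])).modify e.2.1 []
        (fun l => l ++ [(e.1, e.2.2)])).getD u [] =
        g.getD u [] ++ ((if e.1 == u then [(e.2.1, e.2.2)] else []) ++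
          (if e.2.1 == u then [(e.1, e.2.2)] else [])) := by
      simp only [PySem.Dict.getD_modify]
      by_cases h1 : e.1 = u <;> by_cases h2 : e.2.1 = u
      · rw [if_pos h2.symm, if_pos (h2.trans h1.symm), h1, h2]
        simp
      · rw [if_neg (fun h => h2 h.symm), if_pos h1.symm, h1]
        simp [h2]
      · rw [if_pos h2.symm, if_neg (fun h => h1 (h.symm.trans h2)), h2]
        simp [h1]
      · rw [if_neg (fun h => h2 h.symm), if_neg (fun h => h1 h.symm)]
        simp [h1, h2]
    show ((g.modify e.1 [] fun l => l ++ [(e.2.1, e.2.2)]).modify e.2.1 []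
        (fun l => l ++ [(e.1, e.2.2)])).getD u [] ++ pvNeighbors es u =
      g.getD u [] ++ pvNeighbors (e :: es) u
    rw [hstep]
    have : pvNeighbors (e :: es) u =
        ((if e.1 == u then [(e.2.1, e.2.2)] else []) ++ (if e.2.1 == u then [(e.1, e.2.2)] else []))
          ++ pvNeighbors es u := by simp [pvNeighbors]
    rw [this]
    simp [List.append_assoc]

lemma sspAdj_getD (edges : List (Int × Int × Int)) (u : Int) :
    (sspAdj edges).getD u [] = pvNeighbors edges u := by
  unfold sspAdj
  rw [adj_getD]
  simp [PySem.Dict.getD_empty]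

lemma loop_sim (n : Int) (edges : List (Int × Int × Int)) :
    ∀ (fuel : Nat) (hp : List (Int × Int × Int)) (dist : List (Option Int × Option Int))
      (pend : List (Int × Int × Int)) (d0 d1 : List (Option Int)),
      hp.Perm pend → dist.map Prod.fst = d0 → dist.map Prod.snd = d1 →
      (sspLoopA n (sspAdj edges) fuel hp dist).map Prod.fst = (sspLoopB n edges fuel pend d0 d1).1 ∧
      (sspLoopA n (sspAdj edges) fuel hp dist).map Prod.snd = (sspLoopB n edges fuel pend d0 d1).2 := by
  intro fuel
  induction fuel with
  | zero => intro hp dist pend d0 d1 _ h0 h1; exact ⟨h0, h1⟩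
  | succ fuel ih =>
    intro hp dist pend d0 d1 hperm h0 h1
    subst h0 h1
    rcases pvPopMin?_perm hperm with ⟨ha, hb⟩ | ⟨m, r, r', ha, hb, hrr⟩
    · constructor <;> simp [sspLoopA, sspLoopB, ha, hb]
    · obtain ⟨d, u, idx⟩ := m
      simp only [sspLoopA, sspLoopB, ha, hb]
      have hcond : (if idx == 0 then (dist.map Prod.fst).getD (pvIdx n u) none
          else (dist.map Prod.snd).getD (pvIdx n u) none) =
          (if idx == 0 then (dist.getD (pvIdx n u) (none, none)).1
          else (dist.getD (pvIdx n u) (none, none)).2) := by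
        by_cases h : (idx == 0) = true
        · rw [if_pos h, if_pos h]; exact getD_map_fst dist (pvIdx n u)
        · rw [if_neg h, if_neg h]; exact getD_map_snd dist (pvIdx n u)
      rw [hcond]
      by_cases hskip : pvInfLt (if idx == 0 then (dist.getD (pvIdx n u) (none, none)).1
          else (dist.getD (pvIdx n u) (none, none)).2) d = true
      · simp only [hskip, if_true]
        exact ih r dist r' _ _ hrr rfl rfl
      · simp only [Bool.not_eq_true] at hskip
        simp only [hskip, Bool.false_eq_true, if_false]
        rw [sspAdj_getD]
        have hfold := fold_rel n u d edges dist r (dist.map Prod.fst, dist.map Prod.snd, r')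
          ⟨rfl, rfl, hrr⟩
        obtain ⟨f0, f1, fp⟩ := hfold
        exact ih _ _ _ _ _ fp f0 f1

-- ===== VERDICT (by name: the statement is the Claim_ definition above) =====
theorem second_shortest_path_spec : Claim_equal_second_shortest_path := by
  intro n edges src dst _ _
  unfold Spec_second_shortest_path second_shortest_path second_shortest_path_alt
  have h0 : ((List.replicate n.toNat ((none : Option Int), (none : Option Int))).set (pvIdx n src)
      (some 0, none)).map Prod.fst =
      (List.replicate n.toNat (none : Option Int)).set (pvIdx n src) (some 0) := by
    rw [List.map_set, List.map_replicate]
  have h1 : ((List.replicate n.toNat ((none : Option Int), (none : Option Int))).set (pvIdx n src)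
      (some 0, none)).map Prod.snd = List.replicate n.toNat (none : Option Int) := by
    rw [List.map_set, List.map_replicate, List.set_replicate_self]
  obtain ⟨hf, hs⟩ := loop_sim n edges (pvFuel n edges) [(0, src, 0)]
    ((List.replicate n.toNat ((none : Option Int), (none : Option Int))).set (pvIdx n src) (some 0, none))
    [(0, src, 0)]
    ((List.replicate n.toNat (none : Option Int)).set (pvIdx n src) (some 0))
    (List.replicate n.toNat (none : Option Int))
    (List.Perm.refl _) h0 h1
  dsimp only
  rw [← getD_map_snd, hs]
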